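-- pv_equiv track=rewrite | github.com/MdAbedin/binarysearch | 0701 - 0800/0778 Removing Triple Successive Duplicates.py | solve
-- ===== SOURCE A (Python) =====
-- def solve(s):
--     if len(s) < 3: return 0
--
--     vals = [-1,-1,-1,-1]
--     if s[1] == "0":
--         if s[0] == "0":
--             vals = [1,0,1,2]
--         else:
--             vals = [0,1,2,1]
--     else:
--         if s[0] == "0":
--             vals = [2,1,0,1]
--         else:
--             vals = [1,2,1,0]
--
--     for i in range(2,len(s)):
--         if s[i] == "0":
--             vals = [min(vals[2],vals[3]),vals[0],1+min(vals[0],vals[1]),1+vals[2]]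
--         else:
--             vals = [1+min(vals[2],vals[3]),1+vals[0],min(vals[0],vals[1]),vals[2]]
--
--     return min(vals)
-- ===== SOURCE B (Python) =====
-- def solve(s):
--     # Sum over maximal runs of the "is '0'" classification of floor(run_len/3):
--     # each run of L equal characters needs exactly L//3 changes, runs are independent.
--     if not s:
--         return 0
--     total = 0
--     cur = (s[0] == "0")
--     cnt = 1
--     for c in s[1:]:
--         z = (c == "0")
--         if z == cur:
--             cnt += 1
--         else:
--             total += cnt // 3
--             cur = z
--             cnt = 1
--     return total + cnt // 3
-- ===== Notes on version B (the rewrite author's own statement) =====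
-- stated objective: simpler
-- what changed: Replaces A's four-state dynamic program (a vector of four change-costs rebuilt per character and minimised at the end) by a single greedy pass that splits the string into maximal runs of equal classification (char == '0') and sums floor(run_length/3) per run.
import Mathlib
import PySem

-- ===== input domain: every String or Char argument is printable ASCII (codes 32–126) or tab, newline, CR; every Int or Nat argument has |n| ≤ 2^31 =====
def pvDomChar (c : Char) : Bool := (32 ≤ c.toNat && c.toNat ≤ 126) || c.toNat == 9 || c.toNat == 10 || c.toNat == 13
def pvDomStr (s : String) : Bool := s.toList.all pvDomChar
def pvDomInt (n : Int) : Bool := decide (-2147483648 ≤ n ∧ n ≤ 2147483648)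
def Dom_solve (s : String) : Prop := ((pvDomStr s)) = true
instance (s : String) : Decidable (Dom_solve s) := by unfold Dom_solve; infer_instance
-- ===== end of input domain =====

-- B replaces A's four-state DP over change-cost vectors by a single greedy run-count pass
-- (sum of floor(run_length/3) over maximal runs of the classification char == '0'); objective: simpler.

-- ===== PORT A =====
-- Python's `vals` list of four ints is ported as a 4-tuple; one loop iteration:
def solveStep (v : Int × Int × Int × Int) (c : Char) : Int × Int × Int × Int :=
  if c = '0' then
    (min v.2.2.1 v.2.2.2, v.1, 1 + min v.1 v.2.1, 1 + v.2.2.1)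
  else
    (1 + min v.2.2.1 v.2.2.2, 1 + v.1, min v.1 v.2.1, v.2.2.1)

-- `for i in range(2, len(s))` reads s[2], s[3], … in order = fold over `l.drop 2`;
-- s[0], s[1] via getD are exact since the branch has length ≥ 3.
def solve (s : String) : Int :=
  let l := s.toList
  if l.length < 3 then 0
  else
    let v0 : Int × Int × Int × Int :=
      if l.getD 1 ' ' = '0' then
        if l.getD 0 ' ' = '0' then (1, 0, 1, 2) else (0, 1, 2, 1)
      else
        if l.getD 0 ' ' = '0' then (2, 1, 0, 1) else (1, 2, 1, 0)
    let v := (l.drop 2).foldl solveStep v0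
    min (min (min v.1 v.2.1) v.2.2.1) v.2.2.2

-- ===== PORT B =====
-- state = (total, cur, cnt): changes charged to finished runs, classification of the
-- current run (char == '0'), and its length.
def altStep (st : Int × Bool × Int) (c : Char) : Int × Bool × Int :=
  let z : Bool := decide (c = '0')
  if z = st.2.1 then (st.1, st.2.1, st.2.2 + 1)
  else (st.1 + PySem.Int.floordiv st.2.2 3, z, 1)

def solve_alt (s : String) : Int :=
  match s.toList with
  | [] => 0
  | c :: rest =>
    let st := rest.foldl altStep ((0 : Int), decide (c = '0'), (1 : Int))
    st.1 + PySem.Int.floordiv st.2.2 3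

-- ===== PRECONDITION & SPEC =====
def Spec_solve (s : String) (out : Int) : Prop := out = solve_alt s
instance (s : String) (out : Int) : Decidable (Spec_solve s out) := by unfold Spec_solve; infer_instance

-- ===== CLAIM (what is proved, stated in full; the proofs are below) =====
def Claim_equal_solve : Prop := ∀ (s : String), Dom_solve s → Spec_solve s (solve s)

-- ===== LEMMAS AND PROOFS =====

-- Shape of A's cost vector during a run: (a, b) is the pair matching the current run's
-- classification, (c, d) the other pair, k = total + cnt / 3, cnt = current run length.
def InvZ (a b c d k cnt : Int) : Prop :=
  (cnt = 1 ∧ a = k ∧ k ≤ b ∧ k + 1 ≤ c ∧ k + 1 ≤ d ∧ min c d ≤ k + 2) ∨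
  (cnt = 2 ∧ b = k ∧ c = k + 1 ∧ (a = k + 1 ∨ a = k + 2) ∧ k + 2 ≤ d) ∨
  (3 ≤ cnt ∧ cnt % 3 = 0 ∧ a = k ∧ (b = k ∨ b = k + 1) ∧ c = k ∧ d = k + 1) ∨
  (4 ≤ cnt ∧ cnt % 3 = 1 ∧ a = k ∧ b = k ∧ c = k + 1 ∧ d = k + 1) ∨
  (5 ≤ cnt ∧ cnt % 3 = 2 ∧ a = k + 1 ∧ b = k ∧ c = k + 1 ∧ d = k + 2)

def InvAB (v : Int × Int × Int × Int) (st : Int × Bool × Int) : Prop :=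
  0 ≤ st.1 ∧ 1 ≤ st.2.2 ∧
  ((st.2.1 = true ∧ InvZ v.1 v.2.1 v.2.2.1 v.2.2.2 (st.1 + st.2.2 / 3) st.2.2) ∨
   (st.2.1 = false ∧ InvZ v.2.2.1 v.2.2.2 v.1 v.2.1 (st.1 + st.2.2 / 3) st.2.2))

theorem invZ_stay (a b c d tot cnt : Int) (_h1 : 1 ≤ cnt)
    (h : InvZ a b c d (tot + cnt / 3) cnt) :
    InvZ (min c d) a (1 + min a b) (1 + c) (tot + (cnt + 1) / 3) (cnt + 1) := by
  unfold InvZ at h ⊢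
  rcases h with h | h | h | h | h
  · exact Or.inr (Or.inl (by omega))
  · exact Or.inr (Or.inr (Or.inl (by omega)))
  · exact Or.inr (Or.inr (Or.inr (Or.inl (by omega))))
  · exact Or.inr (Or.inr (Or.inr (Or.inr (by omega))))
  · exact Or.inr (Or.inr (Or.inl (by omega)))

theorem invZ_flip (a b c d tot cnt : Int) (_h1 : 1 ≤ cnt)
    (h : InvZ a b c d (tot + cnt / 3) cnt) :
    InvZ (min a b) c (1 + min c d) (1 + a) ((tot + cnt / 3) + 1 / 3) 1 := by
  unfold InvZ at h ⊢
  rcases h with h | h | h | h | h <;> exact Or.inl (by omega)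

theorem floordiv3 (n : Int) : PySem.Int.floordiv n 3 = n / 3 :=
  PySem.Int.floordiv_eq_ediv_of_pos (by omega)

theorem inv_step (v : Int × Int × Int × Int) (st : Int × Bool × Int) (ch : Char)
    (h : InvAB v st) : InvAB (solveStep v ch) (altStep st ch) := by
  obtain ⟨v1, v2, v3, v4⟩ := v
  obtain ⟨tot, cur, cnt⟩ := st
  obtain ⟨htot, hcnt, hc⟩ := h
  dsimp only at htot hcnt hc
  by_cases h0 : ch = '0' <;> cases cur <;>
      simp only [solveStep, altStep, h0, decide_true, decide_false, if_true, if_false,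
        Bool.false_eq_true, Bool.true_eq_false, floordiv3] <;>
      unfold InvAB <;> (try dsimp only) <;>
      rcases hc with ⟨hcur, hz⟩ | ⟨hcur, hz⟩ <;> (try exact Bool.noConfusion hcur)
  -- ch = '0', cur = false : run flips to zeros
  · exact ⟨by omega, by omega, Or.inl ⟨rfl, invZ_flip v3 v4 v1 v2 tot cnt hcnt hz⟩⟩
  -- ch = '0', cur = true : zeros run continues
  · exact ⟨by omega, by omega, Or.inl ⟨rfl, invZ_stay v1 v2 v3 v4 tot cnt hcnt hz⟩⟩
  -- ch ≠ '0', cur = false : ones run continues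
  · exact ⟨by omega, by omega, Or.inr ⟨rfl, invZ_stay v3 v4 v1 v2 tot cnt hcnt hz⟩⟩
  -- ch ≠ '0', cur = true : run flips to ones
  · exact ⟨by omega, by omega, Or.inr ⟨rfl, invZ_flip v1 v2 v3 v4 tot cnt hcnt hz⟩⟩

theorem inv_fold (t : List Char) :
    ∀ (v : Int × Int × Int × Int) (st : Int × Bool × Int), InvAB v st →
      InvAB (t.foldl solveStep v) (t.foldl altStep st) := by
  induction t with
  | nil => intro v st h; exact h
  | cons ch t ih =>
    intro v st h
    simpa using ih (solveStep v ch) (altStep st ch) (inv_step v st ch h)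

theorem inv_min (v : Int × Int × Int × Int) (st : Int × Bool × Int) (h : InvAB v st) :
    min (min (min v.1 v.2.1) v.2.2.1) v.2.2.2 = st.1 + st.2.2 / 3 := by
  obtain ⟨v1, v2, v3, v4⟩ := v
  obtain ⟨tot, cur, cnt⟩ := st
  obtain ⟨htot, hcnt, ⟨_, hz⟩ | ⟨_, hz⟩⟩ := h <;> unfold InvZ at hz <;> dsimp only at * <;>
    rcases hz with h | h | h | h | h <;> omega

-- ===== VERDICT (by name: the statement is the Claim_ definition above) =====
theorem solve_spec : Claim_equal_solve := by
  intro s _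
  unfold Spec_solve solve solve_alt
  match hl : s.toList with
  | [] => simp
  | [a] =>
    by_cases ha : a = '0' <;> simp [ha]
  | [a, b] =>
    by_cases ha : a = '0' <;> by_cases hb : b = '0' <;>
      simp [ha, hb, altStep]
  | a :: b :: x :: t =>
    have hlen : ¬ ((a :: b :: x :: t).length < 3) := by simp
    simp only [hlen, if_false, List.getD, List.drop, List.foldl_cons]
    have hinit :
        InvAB (if b = '0' then if a = '0' then ((1:Int),(0:Int),(1:Int),(2:Int)) else (0,1,2,1)
             else if a = '0' then (2,1,0,1) else (1,2,1,0))
            (altStep ((0 : Int), decide (a = '0'), (1 : Int)) b) := by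
      by_cases ha : a = '0' <;> by_cases hb : b = '0' <;>
        simp [ha, hb, altStep, InvAB, InvZ]
    have := inv_fold (x :: t) _ _ hinit
    have hmin := inv_min _ _ this
    simp only [List.foldl_cons] at this hmin ⊢
    rw [floordiv3]
    exact hmin
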